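-- pv_equiv track=rewrite | github.com/tomas-jackson/iic2233-spring-2023 | Tareas/T0 - Intro a Prog./functions.py | regla_1
-- ===== SOURCE A (Python) =====
-- def contar_bloques(indice: int, fila: list) -> int:
--     """
--     esta funcion cuenta los espacios libres ('-') para cado lado de una posicion especifica en una
--     fila retorna la cantidad de bloques vacios
--     """
--     left_check, right_check = True, True  # busca checkear para cada lado del indice
--     counter, index_step_right, index_step_left = 0, 1, 1
--     # counter cuenta las invalidas, index_step dice la distancia del indice que revisamos
--     while left_check or right_check:
--         if left_check is True:
--             # si vamos a checkear fuera de la lista o si vamos a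
--             # checkear una tortuga, la revision de ese lado termina
--             # en cualquier otro caso le sumamos uno al contador y uno a la distancia para checkear
--             if indice - index_step_left < 0 or fila[indice - index_step_left] == 'T':
--                 left_check = False
--             else:
--                 index_step_left, counter = index_step_left + 1, counter + 1
--         if right_check is True:
--             # misma logica que left check
--             if indice + index_step_right > len(fila) - 1 or fila[indice + index_step_right] == 'T':
--                 right_check = False
--             else:
--                 index_step_right, counter = 1 + index_step_right, 1 + counter
--     return counter
--
-- def verificar_alcance_bomba(tablero: list, coordenada: tuple) -> int:
--     """
--     verifica que rango esta cubriendo una bomba, o sea, la cantidad de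
--     bloques que tapa su explosion, usa la funcion 'contar_bloques'
--     retorna el rango de la bomba en forma de int
--     """
--     coord_x = coordenada[0]
--     coord_y = coordenada[1]
--     if tablero[coord_x][coord_y].isnumeric():
--         fila_tablero = tablero[coord_x]
--         col_tablero = list()
--         for index in range(len(tablero)):
--             col_tablero.append(tablero[index][coord_y])
--         bloques_fila = contar_bloques(coord_y, fila_tablero)
--         bloques_col = contar_bloques(coord_x, col_tablero)
--         return bloques_fila + bloques_col + 1
--     else:
--         return 0
--
-- def regla_1(tablero: list) -> bool:
--     """
--     verifica si se cumple la regla 1, retorna True si es que se cumple, False en cualquier otro caso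
--     """
--     final = True
--     for row in range(len(tablero)):
--         for col in range(len(tablero)):
--             if tablero[row][col].isnumeric():
--                 if int(tablero[row][col]) != verificar_alcance_bomba(tablero, (row, col)):
--                     final = False
--     return final
-- ===== SOURCE B (Python) =====
-- def _runs(cells):
--     # runs[j] = number of consecutive non-'T' cells immediately to the left of position j
--     out, prev = [], 0
--     for c in cells:
--         out.append(prev)
--         prev = 0 if c == 'T' else prev + 1
--     return out
--
-- def regla_1(tablero: list) -> bool:
--     n = len(tablero)
--     lefts = [_runs(row) for row in tablero]
--     rights = [list(reversed(_runs(list(reversed(row))))) for row in tablero]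
--     cols = [[tablero[i][j] for i in range(n)] for j in range(n)]
--     ups = [_runs(col) for col in cols]
--     downs = [list(reversed(_runs(list(reversed(col))))) for col in cols]
--     for i in range(n):
--         for j in range(n):
--             cell = tablero[i][j]
--             if cell.isnumeric():
--                 reach = lefts[i][j] + rights[i][j] + ups[j][i] + downs[j][i] + 1
--                 if int(cell) != reach:
--                     return False
--     return True
-- ===== Notes on version B (the rewrite author's own statement) =====
-- stated objective: alternative
-- what changed: Instead of re-scanning the whole row and column outward from every bomb (contar_bloques), B precomputes for every cell the length of the consecutive non-'T' run on each of the four sides with prefix/suffix sweeps and checks each bomb with four table lookups.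
import Mathlib
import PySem

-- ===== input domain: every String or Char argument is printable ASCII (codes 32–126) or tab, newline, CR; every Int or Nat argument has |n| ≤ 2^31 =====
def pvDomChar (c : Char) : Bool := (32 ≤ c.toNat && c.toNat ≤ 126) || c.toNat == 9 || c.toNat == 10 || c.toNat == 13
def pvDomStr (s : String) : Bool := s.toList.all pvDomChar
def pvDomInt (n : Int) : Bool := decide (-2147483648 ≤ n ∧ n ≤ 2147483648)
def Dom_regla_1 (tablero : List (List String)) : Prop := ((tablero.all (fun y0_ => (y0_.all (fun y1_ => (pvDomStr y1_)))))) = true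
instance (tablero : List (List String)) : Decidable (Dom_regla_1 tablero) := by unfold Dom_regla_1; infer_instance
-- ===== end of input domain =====

-- B replaces A's per-bomb outward row/column scans by four linear run-length sweeps, one O(1) lookup per bomb.

-- ===== PORT A =====
def contarLoop (fuel : Nat) (indice : Int) (fila : List String)
    (left_check right_check : Bool) (counter index_step_right index_step_left : Int) : Int :=
  match fuel with
  | 0 => counter
  | fuel + 1 =>
    if left_check || right_check then
      let s :=
        if left_check then
          (if indice - index_step_left < 0 ∨ PySem.List.pyGetD fila (indice - index_step_left) "" = "T"
           then (false, index_step_left, counter)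
           else (left_check, index_step_left + 1, counter + 1))
        else (left_check, index_step_left, counter)
      let t :=
        if right_check then
          (if indice + index_step_right > PySem.List.len fila - 1 ∨ PySem.List.pyGetD fila (indice + index_step_right) "" = "T"
           then (false, index_step_right, s.2.2)
           else (right_check, 1 + index_step_right, 1 + s.2.2))
        else (right_check, index_step_right, s.2.2)
      contarLoop fuel indice fila s.1 t.1 t.2.2 t.2.1 s.2.1
    else counter

def contar_bloques (indice : Int) (fila : List String) : Int :=
  contarLoop (fila.length + indice.toNat + 5) indice fila true true 0 1 1

def verificar_alcance_bomba (tablero : List (List String)) (coordenada : Int × Int) : Int :=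
  let coord_x := coordenada.1
  let coord_y := coordenada.2
  if PySem.Str.strIsdigit (PySem.List.pyGetD (PySem.List.pyGetD tablero coord_x []) coord_y "") then
    let fila_tablero := PySem.List.pyGetD tablero coord_x []
    let col_tablero := (PySem.List.pyRange 0 (PySem.List.len tablero) 1).foldl
      (fun acc index => acc ++ [PySem.List.pyGetD (PySem.List.pyGetD tablero index []) coord_y ""]) []
    let bloques_fila := contar_bloques coord_y fila_tablero
    let bloques_col := contar_bloques coord_x col_tablero
    bloques_fila + bloques_col + 1
  else 0

def regla_1 (tablero : List (List String)) : Bool :=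
  (PySem.List.pyRange 0 (PySem.List.len tablero) 1).foldl (fun final row =>
    (PySem.List.pyRange 0 (PySem.List.len tablero) 1).foldl (fun final col =>
      if PySem.Str.strIsdigit (PySem.List.pyGetD (PySem.List.pyGetD tablero row []) col "") then
        if (PySem.Int.ofStr? (PySem.List.pyGetD (PySem.List.pyGetD tablero row []) col "")).getD 0
             ≠ verificar_alcance_bomba tablero (row, col)
        then false else final
      else final) final) true

-- ===== PORT B =====
def runsAux : List String → Int → List Int
  | [], _ => []
  | c :: rest, prev => prev :: runsAux rest (if c == "T" then 0 else prev + 1)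

def runs (cells : List String) : List Int := runsAux cells 0

def regla_1_alt (tablero : List (List String)) : Bool :=
  let n := tablero.length
  let lefts := tablero.map runs
  let rights := tablero.map (fun row => (runs row.reverse).reverse)
  let cols := (List.range n).map (fun j : Nat => (List.range n).map
    (fun i : Nat => PySem.List.pyGetD (PySem.List.pyGetD tablero (i : Int) []) (j : Int) ""))
  let ups := cols.map runs
  let downs := cols.map (fun col => (runs col.reverse).reverse)
  (List.range n).all (fun i : Nat => (List.range n).all (fun j : Nat =>
    let cell := PySem.List.pyGetD (PySem.List.pyGetD tablero (i : Int) []) (j : Int) ""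
    if PySem.Str.strIsdigit cell then
      ((PySem.Int.ofStr? cell).getD 0 ==
        PySem.List.pyGetD (PySem.List.pyGetD lefts (i : Int) []) (j : Int) 0
        + PySem.List.pyGetD (PySem.List.pyGetD rights (i : Int) []) (j : Int) 0
        + PySem.List.pyGetD (PySem.List.pyGetD ups (j : Int) []) (i : Int) 0
        + PySem.List.pyGetD (PySem.List.pyGetD downs (j : Int) []) (i : Int) 0 + 1)
    else true))

-- ===== PRECONDITION & SPEC =====
-- Pre_ excludes exactly the boards with a row shorter than the board height: there A (and B) raise IndexError.
def Pre_regla_1 (tablero : List (List String)) : Prop :=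
  ∀ row ∈ tablero, tablero.length ≤ row.length
instance (tablero : List (List String)) : Decidable (Pre_regla_1 tablero) := by
  unfold Pre_regla_1; infer_instance
def pvWitness_regla_1 : List (List String) := [["1", "T"], ["T", "-"]]

def Spec_regla_1 (tablero : List (List String)) (out : Bool) : Prop := out = regla_1_alt tablero
instance (tablero : List (List String)) (out : Bool) : Decidable (Spec_regla_1 tablero out) := by
  unfold Spec_regla_1; infer_instance

-- ===== CLAIM (what is proved, stated in full; the proofs are below) =====
def Claim_equal_regla_1 : Prop := ∀ (tablero : List (List String)),
  Dom_regla_1 tablero → Pre_regla_1 tablero → Spec_regla_1 tablero (regla_1 tablero)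

-- ===== LEMMAS AND PROOFS =====

def lrem (fila : List String) (indice isl : Int) : Int :=
  if indice - isl < 0 ∨ PySem.List.pyGetD fila (indice - isl) "" = "T" then 0
  else lrem fila indice (isl + 1) + 1
termination_by (indice - isl + 1).toNat
decreasing_by omega

def rrem (fila : List String) (indice isr : Int) : Int :=
  if indice + isr > (fila.length : Int) - 1 ∨ PySem.List.pyGetD fila (indice + isr) "" = "T" then 0
  else rrem fila indice (isr + 1) + 1
termination_by ((fila.length : Int) - (indice + isr) + 1).toNat
decreasing_by omega

lemma lrem_nonneg (fila : List String) (indice isl : Int) : 0 ≤ lrem fila indice isl := by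
  induction isl using lrem.induct (fila := fila) (indice := indice) with
  | case1 x h => rw [lrem, if_pos h]
  | case2 x h ih => rw [lrem, if_neg h]; omega

lemma lrem_le (fila : List String) (indice isl : Int) :
    lrem fila indice isl ≤ ((indice - isl + 1).toNat : Int) := by
  induction isl using lrem.induct (fila := fila) (indice := indice) with
  | case1 x h => rw [lrem, if_pos h]; omega
  | case2 x h ih => rw [lrem, if_neg h]; push Not at h; omega

lemma rrem_nonneg (fila : List String) (indice isr : Int) : 0 ≤ rrem fila indice isr := by
  induction isr using rrem.induct (fila := fila) (indice := indice) with
  | case1 x h => rw [rrem, if_pos h]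
  | case2 x h ih => rw [rrem, if_neg h]; omega

lemma rrem_le (fila : List String) (indice isr : Int) :
    rrem fila indice isr ≤ (((fila.length : Int) - (indice + isr) + 1).toNat : Int) := by
  induction isr using rrem.induct (fila := fila) (indice := indice) with
  | case1 x h => rw [rrem, if_pos h]; omega
  | case2 x h ih => rw [rrem, if_neg h]; push Not at h; omega

def lS (row : List String) (prev : Int) : Nat → Int
  | 0 => prev
  | j + 1 => if row.getD j "" == "T" then 0 else lS row prev j + 1

def rS (row : List String) (j : Nat) : Int :=
  if h : j + 1 < row.length then
    (if row.getD (j + 1) "" == "T" then 0 else rS row (j + 1) + 1)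
  else 0
termination_by row.length - j

lemma lrem_eq_lS (fila : List String) (indice : Int) :
    ∀ (j : Nat) (isl : Int), indice - isl + 1 = (j : Int) → lrem fila indice isl = lS fila 0 j := by
  intro j
  induction j with
  | zero =>
    intro isl hj
    rw [lrem, if_pos (Or.inl (by omega))]; rfl
  | succ j ih =>
    intro isl hj
    have hix : indice - isl = (j : Int) := by omega
    rw [lrem]
    have hget : PySem.List.pyGetD fila (indice - isl) "" = fila[j]?.getD "" := by
      rw [hix]; simp [List.getD_eq_getElem?_getD]
    by_cases hT : fila[j]?.getD "" = "T"
    · have hb : (fila.getD j "" == "T") = true := by simp [List.getD_eq_getElem?_getD, hT]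
      rw [if_pos (Or.inr (by rw [hget]; exact hT))]
      simp only [lS, hb]; simp
    · rw [if_neg (by push Not; refine ⟨by omega, ?_⟩; rw [hget]; simpa using hT)]
      have hb : (fila.getD j "" == "T") = false := by simp [List.getD_eq_getElem?_getD, hT]
      rw [ih (isl + 1) (by omega)]
      simp only [lS, hb]; simp

lemma rrem_eq_rS (fila : List String) (indice : Int) (_h0 : 0 ≤ indice) :
    ∀ (k : Nat) (isr : Int) (j : Nat), 1 ≤ isr → indice + isr - 1 = (j : Int) →
      fila.length - j ≤ k → rrem fila indice isr = rS fila j := by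
  intro k
  induction k with
  | zero =>
    intro isr j h1 hj hk
    rw [rrem, if_pos (Or.inl (by omega)), rS, dif_neg (by omega)]
  | succ k ih =>
    intro isr j h1 hj hk
    by_cases hin : j + 1 < fila.length
    · have hix : indice + isr = ((j + 1 : Nat) : Int) := by push_cast; omega
      have hget : PySem.List.pyGetD fila (indice + isr) "" = fila[(j+1)]?.getD "" := by
        rw [hix, PySem.List.pyGetD_natCast]; simp [List.getD_eq_getElem?_getD]
      rw [rrem, rS, dif_pos hin]
      by_cases hT : fila[(j+1)]?.getD "" = "T"
      · have hb : (fila.getD (j+1) "" == "T") = true := by simp [List.getD_eq_getElem?_getD, hT]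
        rw [if_pos (Or.inr (by rw [hget]; exact hT))]
        simp only [hb]; simp
      · rw [if_neg (by push Not; refine ⟨by omega, ?_⟩; rw [hget]; simpa using hT)]
        have hb : (fila.getD (j+1) "" == "T") = false := by simp [List.getD_eq_getElem?_getD, hT]
        rw [ih (isr + 1) (j + 1) (by omega) (by push_cast; omega) (by omega)]
        simp only [hb]; simp
    · rw [rrem, if_pos (Or.inl (by omega)), rS, dif_neg hin]

lemma length_runsAux (row : List String) : ∀ prev, (runsAux row prev).length = row.length := by
  induction row with
  | nil => intro prev; simp [runsAux]
  | cons c rest ih => intro prev; simp [runsAux, ih]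

lemma lS_shift (c : String) (rest : List String) :
    ∀ (j : Nat) (prev : Int),
      lS (c :: rest) prev (j + 1) = lS rest (if c == "T" then 0 else prev + 1) j := by
  intro j
  induction j with
  | zero => intro prev; simp [lS]
  | succ j ih =>
    intro prev
    show (if (c :: rest).getD (j+1) "" == "T" then 0 else lS (c :: rest) prev (j+1) + 1) = _
    rw [ih prev]
    simp [lS]

lemma runsAux_getD (row : List String) :
    ∀ (j : Nat) (prev : Int), j < row.length → (runsAux row prev).getD j 0 = lS row prev j := by
  induction row with
  | nil => intro j prev h; simp at h
  | cons c rest ih =>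
    intro j prev h
    cases j with
    | zero => simp [runsAux, lS]
    | succ j =>
      rw [lS_shift]
      rw [show runsAux (c :: rest) prev = prev :: runsAux rest (if c == "T" then 0 else prev + 1) from rfl]
      rw [List.getD_cons_succ]
      exact ih j _ (by simpa using h)

lemma lS_rev (row : List String) :
    ∀ (k j : Nat), j < row.length → row.length - 1 - j = k → lS row.reverse 0 k = rS row j := by
  intro k
  induction k with
  | zero =>
    intro j hj hk
    rw [rS, dif_neg (by omega)]; rfl
  | succ k ih =>
    intro j hj hk
    have hj1 : j + 1 < row.length := by omega
    have hgr : row.reverse.getD k "" = row.getD (j + 1) "" := by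
      have hk' : k < row.length := by omega
      rw [List.getD_eq_getElem _ _ (by simpa using hk'), List.getD_eq_getElem _ _ hj1]
      rw [List.getElem_reverse]
      congr 1
      omega
    rw [rS, dif_pos hj1]
    show (if row.reverse.getD k "" == "T" then 0 else lS row.reverse 0 k + 1) = _
    rw [hgr, ih (j + 1) hj1 (by omega)]

lemma rights_getD (row : List String) (j : Nat) (h : j < row.length) :
    ((runs row.reverse).reverse).getD j 0 = rS row j := by
  have hlen : (runs row.reverse).length = row.length := by
    rw [show runs row.reverse = runsAux row.reverse 0 from rfl, length_runsAux]
    simp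
  rw [List.getD_eq_getElem _ _ (by simpa [hlen] using h), List.getElem_reverse]
  have h2 : (runs row.reverse).length - 1 - j < row.reverse.length := by simp [hlen]; omega
  rw [← List.getD_eq_getElem _ 0 (by simpa [hlen] using h2)]
  rw [show runs row.reverse = runsAux row.reverse 0 from rfl]
  rw [runsAux_getD _ _ _ (by simpa using h2)]
  exact lS_rev row _ j h (by simp [length_runsAux])

lemma contarLoop_ff (fuel : Nat) (indice : Int) (fila : List String) (counter isr isl : Int) :
    contarLoop fuel indice fila false false counter isr isl = counter := by
  cases fuel <;> simp [contarLoop]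

lemma contarLoop_eq (indice : Int) (fila : List String) :
    ∀ (fuel : Nat) (lc rc : Bool) (counter isr isl : Int),
      ((if lc then lrem fila indice isl else 0) + (if rc then rrem fila indice isr else 0)).toNat < fuel →
      contarLoop fuel indice fila lc rc counter isr isl
        = counter + (if lc then lrem fila indice isl else 0)
          + (if rc then rrem fila indice isr else 0) := by
  intro fuel
  induction fuel with
  | zero => intro lc rc counter isr isl h; omega
  | succ fuel ih =>
    intro lc rc counter isr isl h
    have hL := lrem_nonneg fila indice isl
    have hR := rrem_nonneg fila indice isr
    have hL1 := lrem_nonneg fila indice (isl + 1)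
    have hR1 := rrem_nonneg fila indice (isr + 1)
    cases lc <;> cases rc
    · simp [contarLoop_ff]
    · simp at h
      by_cases hg : indice + isr > PySem.List.len fila - 1 ∨ PySem.List.pyGetD fila (indice + isr) "" = "T"
      · have h0 : rrem fila indice isr = 0 := by
          rw [rrem, if_pos (by simpa [PySem.List.len_eq] using hg)]
        simp at hg
        rw [contarLoop]
        simp [hg, contarLoop_ff, h0]
      · have hstep : rrem fila indice isr = rrem fila indice (isr + 1) + 1 := by
          rw [rrem, if_neg (by simpa [PySem.List.len_eq] using hg)]
        simp at hg
        have hg1 : ¬ ((fila.length : Int) ≤ indice + isr) := by omega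
        rw [contarLoop]
        simp only [show ∀ c : Int, (1:Int) + c = c + 1 from fun c => by ring] at *
        simp [hg, hg1]
        rw [ih]
        · simp; omega
        · simp; omega
    · simp at h
      by_cases hg : indice - isl < 0 ∨ PySem.List.pyGetD fila (indice - isl) "" = "T"
      · have h0 : lrem fila indice isl = 0 := by rw [lrem, if_pos hg]
        simp at hg
        rw [contarLoop]
        simp [hg, contarLoop_ff, h0]
      · have hstep : lrem fila indice isl = lrem fila indice (isl + 1) + 1 := by
          rw [lrem, if_neg hg]
        simp at hg
        have hg1 : ¬ (indice < isl) := by omega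
        rw [contarLoop]
        simp [hg, hg1]
        rw [ih]
        · simp; omega
        · simp; omega
    · simp at h
      by_cases hgl : indice - isl < 0 ∨ PySem.List.pyGetD fila (indice - isl) "" = "T" <;>
      by_cases hgr : indice + isr > PySem.List.len fila - 1 ∨ PySem.List.pyGetD fila (indice + isr) "" = "T"
      · have h0l : lrem fila indice isl = 0 := by rw [lrem, if_pos hgl]
        simp at hgl
        have h0r : rrem fila indice isr = 0 := by
          rw [rrem, if_pos (by simpa [PySem.List.len_eq] using hgr)]
        simp at hgr
        rw [contarLoop]
        simp [hgl, hgr, contarLoop_ff, h0l, h0r]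
      · have h0l : lrem fila indice isl = 0 := by rw [lrem, if_pos hgl]
        simp at hgl
        have hstep : rrem fila indice isr = rrem fila indice (isr + 1) + 1 := by
          rw [rrem, if_neg (by simpa [PySem.List.len_eq] using hgr)]
        simp at hgr
        have hgr1 : ¬ ((fila.length : Int) ≤ indice + isr) := by omega
        rw [contarLoop]
        simp only [show ∀ c : Int, (1:Int) + c = c + 1 from fun c => by ring] at *
        simp [hgl, hgr, hgr1]
        rw [ih]
        · simp; omega
        · simp; omega
      · have hstep : lrem fila indice isl = lrem fila indice (isl + 1) + 1 := by
          rw [lrem, if_neg hgl]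
        simp at hgl
        have hgl1 : ¬ (indice < isl) := by omega
        have h0r : rrem fila indice isr = 0 := by
          rw [rrem, if_pos (by simpa [PySem.List.len_eq] using hgr)]
        simp at hgr
        rw [contarLoop]
        simp [hgl, hgl1, hgr]
        rw [ih]
        · simp; omega
        · simp; omega
      · have hstepl : lrem fila indice isl = lrem fila indice (isl + 1) + 1 := by
          rw [lrem, if_neg hgl]
        simp at hgl
        have hgl1 : ¬ (indice < isl) := by omega
        have hstepr : rrem fila indice isr = rrem fila indice (isr + 1) + 1 := by
          rw [rrem, if_neg (by simpa [PySem.List.len_eq] using hgr)]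
        simp at hgr
        have hgr1 : ¬ ((fila.length : Int) ≤ indice + isr) := by omega
        rw [contarLoop]
        simp only [show ∀ c : Int, (1:Int) + c = c + 1 from fun c => by ring] at *
        simp [hgl, hgl1, hgr, hgr1]
        rw [ih]
        · simp; omega
        · simp; omega

lemma contar_bloques_eq (indice : Int) (fila : List String)
    (h0 : 0 ≤ indice) (h1 : indice < (fila.length : Int)) :
    contar_bloques indice fila = lS fila 0 indice.toNat + rS fila indice.toNat := by
  have hl := lrem_le fila indice 1
  have hr := rrem_le fila indice 1
  have hln := lrem_nonneg fila indice 1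
  have hrn := rrem_nonneg fila indice 1
  rw [contar_bloques, contarLoop_eq indice fila _ true true 0 1 1 (by simp; omega)]
  rw [lrem_eq_lS fila indice indice.toNat 1 (by omega)]
  rw [rrem_eq_rS fila indice h0 (fila.length + 1) 1 indice.toNat (by omega) (by omega) (by omega)]
  simp

def colList (tablero : List (List String)) (j : Nat) : List String :=
  (List.range tablero.length).map
    (fun i : Nat => PySem.List.pyGetD (PySem.List.pyGetD tablero (i : Int) []) (j : Int) "")

lemma length_colList (tablero : List (List String)) (j : Nat) :
    (colList tablero j).length = tablero.length := by simp [colList]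

lemma row_len (tablero : List (List String)) (hpre : Pre_regla_1 tablero) (i : Nat)
    (hi : i < tablero.length) : tablero.length ≤ (tablero.getD i []).length := by
  rw [List.getD_eq_getElem _ _ hi]
  exact hpre _ (List.getElem_mem hi)

lemma verificar_eq (tablero : List (List String)) (hpre : Pre_regla_1 tablero) (i j : Nat)
    (hi : i < tablero.length) (hj : j < tablero.length)
    (hd : PySem.Str.strIsdigit (PySem.List.pyGetD (PySem.List.pyGetD tablero (i : Int) []) (j : Int) "") = true) :
    verificar_alcance_bomba tablero ((i : Int), (j : Int))
      = (lS (tablero.getD i []) 0 j + rS (tablero.getD i []) j)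
        + (lS (colList tablero j) 0 i + rS (colList tablero j) i) + 1 := by
  rw [verificar_alcance_bomba]
  simp only [PySem.List.len_eq, if_pos hd]
  rw [PySem.List.foldl_append_singleton_eq_map, List.nil_append]
  rw [PySem.List.pyRange_zero_nat, List.map_map]
  have hcol : (List.range tablero.length).map
      ((fun index => PySem.List.pyGetD (PySem.List.pyGetD tablero index []) (j : Int) "") ∘ (fun k : Nat => (k : Int)))
      = colList tablero j := by
    unfold colList
    apply List.map_congr_left; intro k _; rfl
  rw [hcol]
  have hrow : PySem.List.pyGetD tablero (i : Int) [] = tablero.getD i [] := by simp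
  rw [hrow]
  have h1 : contar_bloques (j : Int) (tablero.getD i [])
      = lS (tablero.getD i []) 0 j + rS (tablero.getD i []) j := by
    have := contar_bloques_eq (j : Int) (tablero.getD i []) (by omega)
      (by have := row_len tablero hpre i hi; exact_mod_cast by omega)
    simpa using this
  have h2 : contar_bloques (i : Int) (colList tablero j)
      = lS (colList tablero j) 0 i + rS (colList tablero j) i := by
    have := contar_bloques_eq (i : Int) (colList tablero j) (by omega)
      (by rw [length_colList]; exact_mod_cast hi)
    simpa using this
  rw [h1, h2]

lemma runs_getD (row : List String) (j : Nat) (h : j < row.length) :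
    (runs row).getD j 0 = lS row 0 j := runsAux_getD row j 0 h

lemma ifnest (c : Bool) (d : Prop) [Decidable d] (acc : Bool) :
    (if c = true then (if d then false else acc) else acc)
      = (if (c && decide d) = true then false else acc) := by
  cases c <;> by_cases hd : d <;> simp [hd]

lemma andnot (X acc : Bool) : (acc && !X) = if X = true then false else acc := by
  cases X <;> cases acc <;> rfl

lemma lookup_lefts (tablero : List (List String)) (i j : Nat)
    (hi : i < tablero.length) (hj : j < (tablero.getD i []).length) :
    PySem.List.pyGetD (PySem.List.pyGetD (tablero.map runs) (i : Int) []) (j : Int) 0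
      = lS (tablero.getD i []) 0 j := by
  have h1 : PySem.List.pyGetD (tablero.map runs) (i : Int) [] = runs (tablero.getD i []) := by
    rw [PySem.List.pyGetD_natCast,
        List.getD_eq_getElem _ _ (by simpa using hi), List.getElem_map,
        ← List.getD_eq_getElem tablero ([] : List String) hi]
  rw [h1, PySem.List.pyGetD_natCast]
  exact runs_getD _ _ hj

lemma lookup_rights (tablero : List (List String)) (i j : Nat)
    (hi : i < tablero.length) (hj : j < (tablero.getD i []).length) :
    PySem.List.pyGetD (PySem.List.pyGetD (tablero.map (fun row => (runs row.reverse).reverse)) (i : Int) []) (j : Int) 0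
      = rS (tablero.getD i []) j := by
  have h1 : PySem.List.pyGetD (tablero.map (fun row => (runs row.reverse).reverse)) (i : Int) []
      = (runs (tablero.getD i []).reverse).reverse := by
    rw [PySem.List.pyGetD_natCast,
        List.getD_eq_getElem _ _ (by simpa using hi), List.getElem_map,
        ← List.getD_eq_getElem tablero ([] : List String) hi]
  rw [h1, PySem.List.pyGetD_natCast]
  exact rights_getD _ _ hj

lemma lookup_ups (tablero : List (List String)) (i j : Nat)
    (hi : i < tablero.length) (hj : j < tablero.length) :
    PySem.List.pyGetD (PySem.List.pyGetD (((List.range tablero.length).map (fun j' : Nat => (List.range tablero.length).map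
      (fun i' : Nat => PySem.List.pyGetD (PySem.List.pyGetD tablero (i' : Int) []) (j' : Int) ""))).map runs) (j : Int) []) (i : Int) 0
      = lS (colList tablero j) 0 i := by
  have h1 : PySem.List.pyGetD (((List.range tablero.length).map (fun j' : Nat => (List.range tablero.length).map
      (fun i' : Nat => PySem.List.pyGetD (PySem.List.pyGetD tablero (i' : Int) []) (j' : Int) ""))).map runs) (j : Int) []
      = runs (colList tablero j) := by
    rw [List.map_map, PySem.List.pyGetD_natCast,
        List.getD_eq_getElem _ _ (by simpa using hj), List.getElem_map, List.getElem_range]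
    rfl
  rw [h1, PySem.List.pyGetD_natCast]
  exact runs_getD _ _ (by rw [length_colList]; exact hi)

lemma lookup_downs (tablero : List (List String)) (i j : Nat)
    (hi : i < tablero.length) (hj : j < tablero.length) :
    PySem.List.pyGetD (PySem.List.pyGetD (((List.range tablero.length).map (fun j' : Nat => (List.range tablero.length).map
      (fun i' : Nat => PySem.List.pyGetD (PySem.List.pyGetD tablero (i' : Int) []) (j' : Int) ""))).map
        (fun col => (runs col.reverse).reverse)) (j : Int) []) (i : Int) 0
      = rS (colList tablero j) i := by
  have h1 : PySem.List.pyGetD (((List.range tablero.length).map (fun j' : Nat => (List.range tablero.length).map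
      (fun i' : Nat => PySem.List.pyGetD (PySem.List.pyGetD tablero (i' : Int) []) (j' : Int) ""))).map
        (fun col => (runs col.reverse).reverse)) (j : Int) []
      = (runs (colList tablero j).reverse).reverse := by
    rw [List.map_map, PySem.List.pyGetD_natCast,
        List.getD_eq_getElem _ _ (by simpa using hj), List.getElem_map, List.getElem_range]
    rfl
  rw [h1, PySem.List.pyGetD_natCast]
  exact rights_getD _ _ (by rw [length_colList]; exact hi)

lemma any_congr_mem {α : Type} (l : List α) (p q : α → Bool) (h : ∀ x ∈ l, p x = q x) :
    l.any p = l.any q := by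
  induction l with
  | nil => rfl
  | cons a t ih =>
    simp only [List.any_cons, h a (by simp)]
    rw [ih (fun x hx => h x (by simp [hx]))]

lemma neq_bool (v S : Int) : (true && decide (v ≠ S)) = !(v == S) := by
  by_cases h : v = S <;> simp [h]

theorem regla_1_agrees (tablero : List (List String)) (hpre : Pre_regla_1 tablero) :
    regla_1 tablero = regla_1_alt tablero := by
  rw [regla_1, regla_1_alt]
  simp only [PySem.List.len_eq, PySem.List.pyRange_zero_nat, List.foldl_map]
  have hinner : ∀ (acc : Bool), ∀ row ∈ List.range tablero.length,
      (List.foldl (fun final (col : Nat) =>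
        if PySem.Str.strIsdigit (PySem.List.pyGetD (PySem.List.pyGetD tablero (row : Int) []) (col : Int) "") then
          if (PySem.Int.ofStr? (PySem.List.pyGetD (PySem.List.pyGetD tablero (row : Int) []) (col : Int) "")).getD 0
               ≠ verificar_alcance_bomba tablero ((row : Int), (col : Int))
          then false else final
        else final) acc (List.range tablero.length))
      = if ((List.range tablero.length).any (fun col : Nat =>
          PySem.Str.strIsdigit (PySem.List.pyGetD (PySem.List.pyGetD tablero (row : Int) []) (col : Int) "") &&
          decide ((PySem.Int.ofStr? (PySem.List.pyGetD (PySem.List.pyGetD tablero (row : Int) []) (col : Int) "")).getD 0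
            ≠ verificar_alcance_bomba tablero ((row : Int), (col : Int))))) = true then false else acc := by
    intro acc row _
    rw [PySem.List.foldl_congr_mem _ _ (fun final (col : Nat) =>
      if ((PySem.Str.strIsdigit (PySem.List.pyGetD (PySem.List.pyGetD tablero (row : Int) []) (col : Int) "") &&
          decide ((PySem.Int.ofStr? (PySem.List.pyGetD (PySem.List.pyGetD tablero (row : Int) []) (col : Int) "")).getD 0
            ≠ verificar_alcance_bomba tablero ((row : Int), (col : Int))))) = true then false else final) acc
      (fun acc' col _ => ifnest _ _ acc')]
    rw [PySem.List.foldl_if_false_eq, andnot]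
  rw [PySem.List.foldl_congr_mem _ _ _ true hinner]
  rw [PySem.List.foldl_if_false_eq, andnot]
  have hkey : ∀ i, i < tablero.length → ∀ j, j < tablero.length →
      PySem.Str.strIsdigit (PySem.List.pyGetD (PySem.List.pyGetD tablero (i : Int) []) (j : Int) "") = true →
      verificar_alcance_bomba tablero ((i : Int), (j : Int))
        = PySem.List.pyGetD (PySem.List.pyGetD (tablero.map runs) (i : Int) []) (j : Int) 0
          + PySem.List.pyGetD (PySem.List.pyGetD (tablero.map (fun row => (runs row.reverse).reverse)) (i : Int) []) (j : Int) 0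
          + PySem.List.pyGetD (PySem.List.pyGetD (((List.range tablero.length).map (fun j' : Nat => (List.range tablero.length).map
              (fun i' : Nat => PySem.List.pyGetD (PySem.List.pyGetD tablero (i' : Int) []) (j' : Int) ""))).map runs) (j : Int) []) (i : Int) 0
          + PySem.List.pyGetD (PySem.List.pyGetD (((List.range tablero.length).map (fun j' : Nat => (List.range tablero.length).map
              (fun i' : Nat => PySem.List.pyGetD (PySem.List.pyGetD tablero (i' : Int) []) (j' : Int) ""))).map
                (fun col => (runs col.reverse).reverse)) (j : Int) []) (i : Int) 0 + 1 := by
    intro i hi j hj hd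
    have hjrow : j < (tablero.getD i []).length := lt_of_lt_of_le hj (row_len tablero hpre i hi)
    rw [verificar_eq tablero hpre i j hi hj hd,
        lookup_lefts tablero i j hi hjrow, lookup_rights tablero i j hi hjrow,
        lookup_ups tablero i j hi hj, lookup_downs tablero i j hi hj]
    ring
  have hcell : ∀ i, i < tablero.length → ∀ j, j < tablero.length →
      (PySem.Str.strIsdigit (PySem.List.pyGetD (PySem.List.pyGetD tablero (i : Int) []) (j : Int) "") &&
        decide ((PySem.Int.ofStr? (PySem.List.pyGetD (PySem.List.pyGetD tablero (i : Int) []) (j : Int) "")).getD 0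
          ≠ verificar_alcance_bomba tablero ((i : Int), (j : Int))))
      = !(if PySem.Str.strIsdigit (PySem.List.pyGetD (PySem.List.pyGetD tablero (i : Int) []) (j : Int) "") then
          ((PySem.Int.ofStr? (PySem.List.pyGetD (PySem.List.pyGetD tablero (i : Int) []) (j : Int) "")).getD 0 ==
            PySem.List.pyGetD (PySem.List.pyGetD (tablero.map runs) (i : Int) []) (j : Int) 0
            + PySem.List.pyGetD (PySem.List.pyGetD (tablero.map (fun row => (runs row.reverse).reverse)) (i : Int) []) (j : Int) 0
            + PySem.List.pyGetD (PySem.List.pyGetD (((List.range tablero.length).map (fun j' : Nat => (List.range tablero.length).map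
                (fun i' : Nat => PySem.List.pyGetD (PySem.List.pyGetD tablero (i' : Int) []) (j' : Int) ""))).map runs) (j : Int) []) (i : Int) 0
            + PySem.List.pyGetD (PySem.List.pyGetD (((List.range tablero.length).map (fun j' : Nat => (List.range tablero.length).map
                (fun i' : Nat => PySem.List.pyGetD (PySem.List.pyGetD tablero (i' : Int) []) (j' : Int) ""))).map
                  (fun col => (runs col.reverse).reverse)) (j : Int) []) (i : Int) 0 + 1)
        else true) := by
    intro i hi j hj
    by_cases hd : PySem.Str.strIsdigit (PySem.List.pyGetD (PySem.List.pyGetD tablero (i : Int) []) (j : Int) "") = true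
    · rw [hkey i hi j hj hd, if_pos hd, hd]
      exact neq_bool _ _
    · rw [Bool.not_eq_true] at hd
      rw [hd]
      simp
  have hX : ((List.range tablero.length).any (fun i : Nat => (List.range tablero.length).any (fun j : Nat =>
      PySem.Str.strIsdigit (PySem.List.pyGetD (PySem.List.pyGetD tablero (i : Int) []) (j : Int) "") &&
      decide ((PySem.Int.ofStr? (PySem.List.pyGetD (PySem.List.pyGetD tablero (i : Int) []) (j : Int) "")).getD 0
        ≠ verificar_alcance_bomba tablero ((i : Int), (j : Int))))))
      = !((List.range tablero.length).all (fun i : Nat => (List.range tablero.length).all (fun j : Nat =>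
        (if PySem.Str.strIsdigit (PySem.List.pyGetD (PySem.List.pyGetD tablero (i : Int) []) (j : Int) "") then
          ((PySem.Int.ofStr? (PySem.List.pyGetD (PySem.List.pyGetD tablero (i : Int) []) (j : Int) "")).getD 0 ==
            PySem.List.pyGetD (PySem.List.pyGetD (tablero.map runs) (i : Int) []) (j : Int) 0
            + PySem.List.pyGetD (PySem.List.pyGetD (tablero.map (fun row => (runs row.reverse).reverse)) (i : Int) []) (j : Int) 0
            + PySem.List.pyGetD (PySem.List.pyGetD (((List.range tablero.length).map (fun j' : Nat => (List.range tablero.length).map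
                (fun i' : Nat => PySem.List.pyGetD (PySem.List.pyGetD tablero (i' : Int) []) (j' : Int) ""))).map runs) (j : Int) []) (i : Int) 0
            + PySem.List.pyGetD (PySem.List.pyGetD (((List.range tablero.length).map (fun j' : Nat => (List.range tablero.length).map
                (fun i' : Nat => PySem.List.pyGetD (PySem.List.pyGetD tablero (i' : Int) []) (j' : Int) ""))).map
                  (fun col => (runs col.reverse).reverse)) (j : Int) []) (i : Int) 0 + 1)
        else true)))) := by
    rw [List.not_all_eq_any_not]
    apply any_congr_mem
    intro i hi
    rw [List.not_all_eq_any_not]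
    apply any_congr_mem
    intro j hj
    simp only [List.mem_range] at hi hj
    exact hcell i hi j hj
  rw [hX]
  cases ((List.range tablero.length).all (fun i : Nat => (List.range tablero.length).all (fun j : Nat =>
        (if PySem.Str.strIsdigit (PySem.List.pyGetD (PySem.List.pyGetD tablero (i : Int) []) (j : Int) "") then
          ((PySem.Int.ofStr? (PySem.List.pyGetD (PySem.List.pyGetD tablero (i : Int) []) (j : Int) "")).getD 0 ==
            PySem.List.pyGetD (PySem.List.pyGetD (tablero.map runs) (i : Int) []) (j : Int) 0
            + PySem.List.pyGetD (PySem.List.pyGetD (tablero.map (fun row => (runs row.reverse).reverse)) (i : Int) []) (j : Int) 0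
            + PySem.List.pyGetD (PySem.List.pyGetD (((List.range tablero.length).map (fun j' : Nat => (List.range tablero.length).map
                (fun i' : Nat => PySem.List.pyGetD (PySem.List.pyGetD tablero (i' : Int) []) (j' : Int) ""))).map runs) (j : Int) []) (i : Int) 0
            + PySem.List.pyGetD (PySem.List.pyGetD (((List.range tablero.length).map (fun j' : Nat => (List.range tablero.length).map
                (fun i' : Nat => PySem.List.pyGetD (PySem.List.pyGetD tablero (i' : Int) []) (j' : Int) ""))).map
                  (fun col => (runs col.reverse).reverse)) (j : Int) []) (i : Int) 0 + 1)
        else true)))) <;> rfl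

-- ===== VERDICT (by name: the statement is the Claim_ definition above) =====
theorem regla_1_spec : Claim_equal_regla_1 := by
  intro tablero _hdom hpre
  unfold Spec_regla_1
  exact regla_1_agrees tablero hpre
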